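-- pv_equiv track=rewrite | github.com/sangwooxx/clode | backend/scripts/import_legacy_snapshot.py | build_unique_contract_name_map
-- ===== SOURCE A (Python) =====
-- def text(value) -> str:
--     return str(value or "").strip()
--
-- def build_unique_contract_name_map(contract_rows):
--     name_to_ids: dict[str, list[str]] = {}
--     for row in contract_rows:
--         contract_name = text(row.get("name"))
--         contract_id = text(row.get("id"))
--         if not contract_name or not contract_id:
--             continue
--         name_to_ids.setdefault(contract_name, []).append(contract_id)
--     return {
--         contract_name: ids[0]
--         for contract_name, ids in name_to_ids.items()
--         if len(set(ids)) == 1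
--     }
-- ===== SOURCE B (Python) =====
-- def build_unique_contract_name_map(contract_rows):
--     reps: dict[str, str] = {}
--     conflicts: set[str] = set()
--     for row in contract_rows:
--         name = str(row.get("name") or "").strip()
--         contract_id = str(row.get("id") or "").strip()
--         if not name or not contract_id:
--             continue
--         if name not in reps:
--             reps[name] = contract_id
--         elif reps[name] != contract_id:
--             conflicts.add(name)
--     return {name: rep for name, rep in reps.items() if name not in conflicts}
-- ===== Notes on version B (the rewrite author's own statement) =====
-- stated objective: simpler
-- what changed: Instead of grouping every id into per-name lists and post-filtering names whose id set has size 1, B keeps a single representative id per name plus a conflict set updated on the fly, so no lists are built and no set() pass runs at the end.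
import Mathlib
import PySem

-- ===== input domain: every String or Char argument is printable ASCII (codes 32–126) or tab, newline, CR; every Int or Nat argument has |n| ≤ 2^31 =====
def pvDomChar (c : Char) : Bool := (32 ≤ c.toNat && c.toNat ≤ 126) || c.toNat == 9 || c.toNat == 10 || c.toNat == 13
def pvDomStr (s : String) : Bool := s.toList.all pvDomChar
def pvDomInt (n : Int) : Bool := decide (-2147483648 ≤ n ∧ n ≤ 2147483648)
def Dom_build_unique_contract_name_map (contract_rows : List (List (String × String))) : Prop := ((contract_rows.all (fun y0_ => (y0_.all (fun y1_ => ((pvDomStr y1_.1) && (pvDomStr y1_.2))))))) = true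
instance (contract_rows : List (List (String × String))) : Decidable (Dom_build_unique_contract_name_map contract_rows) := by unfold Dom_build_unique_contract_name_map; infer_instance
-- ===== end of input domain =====

-- B replaces A's per-name id lists and final set()-size filter by one representative id per name
-- plus an on-the-fly conflict set: simpler bookkeeping, same result (objective: simpler).


-- ===== PORT A =====
-- text(row.get(k)): row.get returns None or a string; `value or ""` maps both None and "" to "",
-- then .strip(); since "".strip() = "", this is exactly getD with default "" followed by strip.
def pvName (row : List (String × String)) : String :=
  PySem.Str.strip (PySem.Dict.getD (PySem.Dict.mk row) "name" "")

def pvId (row : List (String × String)) : String :=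
  PySem.Str.strip (PySem.Dict.getD (PySem.Dict.mk row) "id" "")

-- one iteration of A's for-loop: name_to_ids.setdefault(name, []).append(id)
def pvStepA (m : PySem.Dict String (List String)) (row : List (String × String)) :
    PySem.Dict String (List String) :=
  if pvName row = "" ∨ pvId row = "" then m
  else m.insert (pvName row) (m.getD (pvName row) [] ++ [pvId row])

def build_unique_contract_name_map (contract_rows : List (List (String × String))) : List (String × String) :=
  let m := contract_rows.foldl pvStepA PySem.Dict.empty
  -- the dict comprehension over name_to_ids.items(); ids[0] never raises in Python because every
  -- kept list is nonempty (len(set(ids)) == 1), and headD "" equals ids[0] there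
  (m.items.filter (fun p => (PySem.Set.ofList p.2).length == 1)).map (fun p => (p.1, p.2.headD ""))

-- ===== PORT B =====
-- one iteration of B's for-loop over the state (reps, conflicts)
def pvStepB (st : PySem.Dict String String × PySem.Set String) (row : List (String × String)) :
    PySem.Dict String String × PySem.Set String :=
  if pvName row = "" ∨ pvId row = "" then st
  else
    match st.1.get? (pvName row) with
    | none => (st.1.insert (pvName row) (pvId row), st.2)
    | some r => if r = pvId row then st else (st.1, PySem.Set.add st.2 (pvName row))

def build_unique_contract_name_map_alt (contract_rows : List (List (String × String))) : List (String × String) :=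
  let st := contract_rows.foldl pvStepB (PySem.Dict.empty, PySem.Set.empty)
  st.1.items.filter (fun p => !(st.2.contains p.1))

-- ===== PRECONDITION & SPEC =====
def Spec_build_unique_contract_name_map (contract_rows : List (List (String × String))) (out : List (String × String)) : Prop := out = build_unique_contract_name_map_alt contract_rows
instance (contract_rows : List (List (String × String))) (out : List (String × String)) : Decidable (Spec_build_unique_contract_name_map contract_rows out) := by unfold Spec_build_unique_contract_name_map; infer_instance

-- ===== CLAIM (what is proved, stated in full; the proofs are below) =====
def Claim_equal_build_unique_contract_name_map : Prop := ∀ (contract_rows : List (List (String × String))), Dom_build_unique_contract_name_map contract_rows → Spec_build_unique_contract_name_map contract_rows (build_unique_contract_name_map contract_rows)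

-- ===== LEMMAS AND PROOFS =====

-- projection taking A's (name, ids) entry to B's (name, first id) entry
def pvFst (p : String × List String) : String × String := (p.1, p.2.headD "")

-- all ids equal to the first one
def pvAllEq (ids : List String) : Bool := ids.all (fun x => x == ids.headD "")

-- invariant tying A's fold state to B's
def pvInv (m : PySem.Dict String (List String))
    (st : PySem.Dict String String × PySem.Set String) : Prop :=
  m.keys.Nodup ∧
  st.1 = PySem.Dict.mk (m.items.map pvFst) ∧
  (∀ p ∈ m.items, p.2 ≠ []) ∧
  (∀ k : String, st.2.contains k = true ↔
      ∃ ids, m.get? k = some ids ∧ ¬ (pvAllEq ids = true))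

theorem pv_get?_map (d : PySem.Dict String (List String)) (k : String) :
    (PySem.Dict.mk (d.items.map pvFst)).get? k = (d.get? k).map (fun ids => ids.headD "") := by
  simp [PySem.Dict.get?, List.find?_map, pvFst, Function.comp_def, Option.map_map]

theorem pv_contains_iff (s : PySem.Set String) (x : String) :
    s.contains x = true ↔ x ∈ s := by
  simp [PySem.Set.contains]

theorem pv_allEq_append (a : String) (t : List String) (c : String) :
    pvAllEq ((a :: t) ++ [c]) = (pvAllEq (a :: t) && (c == (a :: t).headD "")) := by
  simp [pvAllEq, List.all_append, Bool.and_comm]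

theorem pvInv_init : pvInv PySem.Dict.empty (PySem.Dict.empty, PySem.Set.empty) := by
  refine ⟨by simp [PySem.Dict.keys_empty], rfl, by simp [PySem.Dict.empty], ?_⟩
  intro k
  simp [PySem.Set.empty, PySem.Set.contains, PySem.Dict.get?_empty]

set_option maxHeartbeats 1000000 in
theorem pvInv_step (m : PySem.Dict String (List String))
    (st : PySem.Dict String String × PySem.Set String) (row : List (String × String))
    (h : pvInv m st) : pvInv (pvStepA m row) (pvStepB st row) := by
  obtain ⟨hnd, hreps, hne, hconf⟩ := h
  by_cases hskip : pvName row = "" ∨ pvId row = ""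
  · simpa [pvStepA, pvStepB, hskip] using ⟨hnd, hreps, hne, hconf⟩
  · cases hget : st.1.get? (pvName row) with
    | none =>
      have hm : m.get? (pvName row) = none := by
        rw [hreps, pv_get?_map] at hget
        exact Option.map_eq_none_iff.mp hget
      have hcontSt : st.1.contains (pvName row) = false := by
        rw [PySem.Dict.contains_eq_isSome_get?, hget]; rfl
      have hcont : m.contains (pvName row) = false := by
        rw [PySem.Dict.contains_eq_isSome_get?, hm]; rfl
      have hgetD : m.getD (pvName row) [] = [] := by
        rw [PySem.Dict.getD_eq_get?_getD, hm]; rfl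
      simp only [pvStepA, pvStepB, if_neg hskip, hget, hgetD, List.nil_append]
      refine ⟨PySem.Dict.nodup_keys_insert _ _ _ hnd, ?_, ?_, ?_⟩
      · apply PySem.Dict.ext
        rw [PySem.Dict.items_insert_of_not_contains _ _ hcontSt,
            PySem.Dict.items_insert_of_not_contains _ _ hcont]
        simp [hreps, pvFst]
      · intro p hp
        rw [PySem.Dict.items_insert_of_not_contains _ _ hcont] at hp
        rcases List.mem_append.mp hp with hp | hp
        · exact hne p hp
        · simp only [List.mem_singleton] at hp
          subst hp; simp
      · intro k
        rw [PySem.Dict.get?_insert]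
        by_cases hk : k = pvName row
        · subst hk
          rw [if_pos rfl]
          constructor
          · intro hc
            obtain ⟨ids, hids, _⟩ := (hconf (pvName row)).1 hc
            rw [hm] at hids; exact absurd hids (by simp)
          · rintro ⟨ids, hids, hall⟩
            injection hids with hids
            subst hids
            exact absurd (by simp [pvAllEq]) hall
        · simp only [if_neg hk]
          exact hconf k
    | some r =>
      have hmap' : (m.get? (pvName row)).map (fun ids => ids.headD "") = some r := by
        rw [← pv_get?_map, ← hreps]; exact hget
      obtain ⟨ids, hmge, hr⟩ := Option.map_eq_some_iff.mp hmap'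
      have hmem : (pvName row, ids) ∈ m.items := PySem.Dict.mem_items_of_get?_eq_some m hmge
      have hidsne : ids ≠ [] := hne _ hmem
      obtain ⟨a, t, rfl⟩ := List.exists_cons_of_ne_nil hidsne
      have hcont : m.contains (pvName row) = true := by
        rw [PySem.Dict.contains_eq_isSome_get?, hmge]; rfl
      have hgetD : m.getD (pvName row) [] = a :: t := by
        rw [PySem.Dict.getD_eq_get?_getD, hmge]; rfl
      have hitems' : (m.insert (pvName row) ((a :: t) ++ [pvId row])).items =
          m.items.map (fun p => if (p.1 == pvName row) = true then (pvName row, (a :: t) ++ [pvId row]) else p) :=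
        PySem.Dict.items_insert_of_contains _ _ hcont
      have hmap2 : (m.insert (pvName row) ((a :: t) ++ [pvId row])).items.map pvFst = m.items.map pvFst := by
        rw [hitems', List.map_map]
        apply List.map_congr_left
        intro p hp
        by_cases hpk : p.1 = pvName row
        · have hgp : m.get? p.1 = some p.2 := PySem.Dict.get?_of_mem_items m hp hnd
          rw [hpk, hmge] at hgp
          have hp2 : p.2 = a :: t := by injection hgp.symm
          simp [pvFst, hpk, hp2]
        · simp [pvFst, hpk]
      have hreps' : st.1 = PySem.Dict.mk ((m.insert (pvName row) ((a :: t) ++ [pvId row])).items.map pvFst) := by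
        rw [hmap2]; exact hreps
      have hne' : ∀ p ∈ (m.insert (pvName row) ((a :: t) ++ [pvId row])).items, p.2 ≠ [] := by
        intro p hp
        rw [hitems'] at hp
        obtain ⟨q, hq, rfl⟩ := List.mem_map.mp hp
        by_cases hqk : (q.1 == pvName row) = true
        · simp [hqk]
        · simp only [hqk, Bool.false_eq_true, not_false_iff, if_neg]
          exact hne q hq
      have hget' : ∀ k, (m.insert (pvName row) ((a :: t) ++ [pvId row])).get? k =
          if k = pvName row then some ((a :: t) ++ [pvId row]) else m.get? k :=
        fun k => PySem.Dict.get?_insert m (pvName row) k ((a :: t) ++ [pvId row])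
      have hall : pvAllEq ((a :: t) ++ [pvId row]) = (pvAllEq (a :: t) && (pvId row == (a :: t).headD "")) :=
        pv_allEq_append a t (pvId row)
      by_cases hrc : r = pvId row
      · -- same id again: both states keep their shape
        simp only [pvStepA, pvStepB, if_neg hskip, hget, if_pos hrc, hgetD]
        refine ⟨PySem.Dict.nodup_keys_insert _ _ _ hnd, hreps', hne', ?_⟩
        intro k
        rw [hget' k]
        by_cases hk : k = pvName row
        · subst hk
          rw [if_pos rfl]
          have hbt : (pvId row == (a :: t).headD "") = true := by
            rw [← hrc, ← hr]; exact beq_self_eq_true _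
          have heq : pvAllEq ((a :: t) ++ [pvId row]) = pvAllEq (a :: t) := by
            rw [hall, hbt, Bool.and_true]
          constructor
          · intro hc
            obtain ⟨ids', hids', hall'⟩ := (hconf (pvName row)).1 hc
            rw [hmge] at hids'
            have : ids' = a :: t := by injection hids'.symm
            subst this
            exact ⟨(a :: t) ++ [pvId row], rfl, by rw [heq]; exact hall'⟩
          · rintro ⟨ids', hids', hall'⟩
            have : ids' = (a :: t) ++ [pvId row] := by injection hids'.symm
            subst this
            rw [heq] at hall'
            exact (hconf (pvName row)).2 ⟨a :: t, hmge, hall'⟩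
        · simp only [if_neg hk]
          exact hconf k
      · -- conflicting id: B records the name in the conflict set
        simp only [pvStepA, pvStepB, if_neg hskip, hget, if_neg hrc, hgetD]
        refine ⟨PySem.Dict.nodup_keys_insert _ _ _ hnd, hreps', hne', ?_⟩
        intro k
        rw [pv_contains_iff, PySem.Set.mem_add, hget' k]
        by_cases hk : k = pvName row
        · subst hk
          rw [if_pos rfl]
          constructor
          · intro _
            refine ⟨(a :: t) ++ [pvId row], rfl, ?_⟩
            rw [hall]
            have hfalse : (pvId row == (a :: t).headD "") = false := by
              rw [hr]; exact beq_eq_false_iff_ne.mpr (fun hcontra => hrc hcontra.symm)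
            rw [hfalse, Bool.and_false]
            exact Bool.false_ne_true
          · intro _; exact Or.inr rfl
        · simp only [if_neg hk]
          constructor
          · rintro (hmem' | hcontra)
            · exact (hconf k).1 ((pv_contains_iff st.2 k).mpr hmem')
            · exact absurd hcontra hk
          · intro hx
            exact Or.inl ((pv_contains_iff st.2 k).mp ((hconf k).2 hx))

theorem pvInv_fold_gen (rows : List (List (String × String)))
    (m : PySem.Dict String (List String)) (st : PySem.Dict String String × PySem.Set String)
    (h : pvInv m st) : pvInv (rows.foldl pvStepA m) (rows.foldl pvStepB st) := by
  induction rows generalizing m st with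
  | nil => exact h
  | cons row rest ih => exact ih _ _ (pvInv_step m st row h)

theorem pv_len_le_foldl_add (t : List String) (s : PySem.Set String) :
    s.length ≤ (List.foldl PySem.Set.add s t).length := by
  induction t generalizing s with
  | nil => simp
  | cons x xs ih =>
    refine le_trans ?_ (ih (PySem.Set.add s x))
    simp only [PySem.Set.add]
    split <;> simp

theorem pv_foldl_add_len_one (h : String) (t : List String) :
    ((List.foldl PySem.Set.add [h] t).length == 1) = t.all (fun x => x == h) := by
  induction t with
  | nil => rfl
  | cons x xs ih =>
    by_cases hx : x = h
    · subst hx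
      simp [List.foldl_cons, ih]
    · have h2 := pv_len_le_foldl_add xs [h, x]
      have hlen : ((List.foldl PySem.Set.add [h, x] xs).length == 1) = false := by
        rw [beq_eq_false_iff_ne]
        simp only [List.length_cons, List.length_nil] at h2
        omega
      simp [List.foldl_cons, hlen, hx]

theorem pv_setLen_one (ids : List String) (h : ids ≠ []) :
    ((PySem.Set.ofList ids).length == 1) = pvAllEq ids := by
  cases ids with
  | nil => exact absurd rfl h
  | cons x t =>
    rw [PySem.Set.ofList_eq_foldl]
    have h1 : PySem.Set.add [] x = [x] := by simp [PySem.Set.add, PySem.Set.contains]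
    simp only [List.foldl_cons, h1, pv_foldl_add_len_one]
    simp [pvAllEq]

-- ===== VERDICT (by name: the statement is the Claim_ definition above) =====
theorem build_unique_contract_name_map_spec : Claim_equal_build_unique_contract_name_map := by
  intro rows _
  unfold Spec_build_unique_contract_name_map build_unique_contract_name_map build_unique_contract_name_map_alt
  obtain ⟨hnd, hreps, hne, hconf⟩ :=
    pvInv_fold_gen rows PySem.Dict.empty (PySem.Dict.empty, PySem.Set.empty) pvInv_init
  simp only [hreps]
  show (((rows.foldl pvStepA PySem.Dict.empty).items.filter
          (fun p => (PySem.Set.ofList p.2).length == 1)).map (fun p => (p.1, p.2.headD ""))) =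
      (((rows.foldl pvStepA PySem.Dict.empty).items.map pvFst).filter
          (fun p => !((rows.foldl pvStepB (PySem.Dict.empty, PySem.Set.empty)).2.contains p.1)))
  rw [List.filter_map]
  have hfc : ∀ p ∈ (rows.foldl pvStepA PySem.Dict.empty).items,
      ((PySem.Set.ofList p.2).length == 1) =
      ((fun q => !((rows.foldl pvStepB (PySem.Dict.empty, PySem.Set.empty)).2.contains q.1)) ∘ pvFst) p := by
    intro p hp
    have hg : (rows.foldl pvStepA PySem.Dict.empty).get? p.1 = some p.2 :=
      PySem.Dict.get?_of_mem_items _ hp hnd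
    have hcontv : (rows.foldl pvStepB (PySem.Dict.empty, PySem.Set.empty)).2.contains p.1 = !pvAllEq p.2 := by
      by_cases hb : pvAllEq p.2 = true
      · have hfalse : ¬ ((rows.foldl pvStepB (PySem.Dict.empty, PySem.Set.empty)).2.contains p.1 = true) := by
          intro hc
          obtain ⟨ids, hids, hna⟩ := (hconf p.1).1 hc
          rw [hg] at hids
          have : ids = p.2 := by injection hids.symm
          subst this
          exact hna hb
        simp only [Bool.not_eq_true] at hfalse
        rw [hfalse, hb]; rfl
      · have htrue : (rows.foldl pvStepB (PySem.Dict.empty, PySem.Set.empty)).2.contains p.1 = true :=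
          (hconf p.1).2 ⟨p.2, hg, hb⟩
        rw [htrue]
        simp only [Bool.not_eq_true] at hb
        rw [hb]; rfl
    simp only [Function.comp_def, pvFst, hcontv, Bool.not_not]
    exact pv_setLen_one p.2 (hne p hp)
  rw [List.filter_congr hfc]
  exact List.map_congr_left (fun p _ => rfl)
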